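-- pv_equiv track=rewrite | github.com/01uan/retro-helpers | yugi-fm/emu.py | chain_final_key
-- ===== SOURCE A (Python) =====
-- EQUIP_BOOST = 500  # FM equip cards give +500 ATK / +500 DEF
--
-- def chain_final_key(chain, card_stats):
--     """Return (result_card_id, final_atk) identifying the end result of a chain."""
--     equip_counts = {}
--     last_result = None
--     for a, b, result, step_type in chain:
--         if step_type == 'fusion':
--             equip_counts.pop(a, None)
--             equip_counts.pop(b, None)
--             last_result = result
--         else:
--             equip_counts[result] = equip_counts.get(result, 0) + 1
--             last_result = result
--     base_atk = card_stats.get(last_result, (0, 0))[0]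
--     final_atk = base_atk + equip_counts.get(last_result, 0) * EQUIP_BOOST
--     return (last_result, final_atk)
-- ===== SOURCE B (Python) =====
-- EQUIP_BOOST = 500  # FM equip cards give +500 ATK / +500 DEF
--
-- def chain_final_key(chain, card_stats):
--     """Return (result_card_id, final_atk) identifying the end result of a chain."""
--     last = chain[-1][2]
--     boosts = 0
--     for a, b, result, step_type in reversed(chain):
--         if step_type == 'fusion' and (a == last or b == last):
--             break
--         if step_type != 'fusion' and result == last:
--             boosts += 1
--     return (last, card_stats.get(last, (0, 0))[0] + boosts * EQUIP_BOOST)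
-- ===== Notes on version B (the rewrite author's own statement) =====
-- stated objective: alternative
-- what changed: B walks the chain backwards with a single scalar counter for the final result card (breaking at the fusion that consumed it), instead of A's forward pass maintaining a dict of equip counts for every card.
-- outside the precondition, e.g. on chain_final_key([], {}): A returns (None, 0), B raises IndexError
import Mathlib
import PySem

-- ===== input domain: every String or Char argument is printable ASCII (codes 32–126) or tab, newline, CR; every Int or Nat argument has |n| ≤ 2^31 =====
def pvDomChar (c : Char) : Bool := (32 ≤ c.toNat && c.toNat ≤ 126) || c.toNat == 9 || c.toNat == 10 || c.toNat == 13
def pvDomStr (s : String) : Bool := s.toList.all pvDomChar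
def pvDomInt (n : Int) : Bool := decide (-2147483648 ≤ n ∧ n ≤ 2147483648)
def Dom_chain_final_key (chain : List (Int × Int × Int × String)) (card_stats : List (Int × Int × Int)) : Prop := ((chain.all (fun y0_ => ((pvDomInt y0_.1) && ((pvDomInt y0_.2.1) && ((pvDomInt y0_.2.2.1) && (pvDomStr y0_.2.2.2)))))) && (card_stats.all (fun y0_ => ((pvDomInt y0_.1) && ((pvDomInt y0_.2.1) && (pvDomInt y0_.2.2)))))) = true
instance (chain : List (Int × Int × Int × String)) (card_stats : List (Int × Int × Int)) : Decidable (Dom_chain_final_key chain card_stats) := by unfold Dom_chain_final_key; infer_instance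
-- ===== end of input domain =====

-- B re-derives the same result by a backward scan keeping one counter for the
-- final card instead of A's forward pass over a dict of all equip counts (alternative decomposition; return value only).


-- ===== PORT A =====
-- loop body of A: state = (equip_counts, last_result)
def stepA (st : PySem.Dict Int Int × Option Int) (x : Int × Int × Int × String) :
    PySem.Dict Int Int × Option Int :=
  if x.2.2.2 == "fusion" then
    ((st.1.erase x.1).erase x.2.1, some x.2.2.1)       -- pop(a, None); pop(b, None); last_result = result
  else
    (st.1.insert x.2.2.1 (st.1.getD x.2.2.1 0 + 1), some x.2.2.1)

def chain_final_key (chain : List (Int × Int × Int × String)) (card_stats : List (Int × Int × Int)) : Int × Int :=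
  match (chain.foldl stepA (PySem.Dict.empty, none)).2 with
  | none => (0, 0)   -- empty chain: Python A returns (None, 0), not an Int; excluded by Pre_
  | some last =>
    (last, (PySem.Dict.getD (PySem.Dict.mk card_stats) last ((0 : Int), (0 : Int))).1
      + (chain.foldl stepA (PySem.Dict.empty, none)).1.getD last 0 * 500)

-- ===== PORT B =====
-- B's reversed(chain) loop: count equips on `last`, break at a fusion consuming `last`
def altCount (last : Int) : List (Int × Int × Int × String) → Int
  | [] => 0
  | (a, b, result, t) :: rest =>
    if t == "fusion" && (a == last || b == last) then 0
    else (if !(t == "fusion") && result == last then 1 else 0) + altCount last rest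

def chain_final_key_alt (chain : List (Int × Int × Int × String)) (card_stats : List (Int × Int × Int)) : Int × Int :=
  match chain.getLast? with   -- chain[-1] (exact: none = IndexError, excluded by Pre_)
  | none => (0, 0)
  | some e =>
    (e.2.2.1, (PySem.Dict.getD (PySem.Dict.mk card_stats) e.2.2.1 ((0 : Int), (0 : Int))).1
      + altCount e.2.2.1 chain.reverse * 500)

-- ===== PRECONDITION & SPEC =====
-- Pre_ excludes only the empty chain, on which A returns (None, 0) — None is not an Int — and B raises IndexError.
def Pre_chain_final_key (chain : List (Int × Int × Int × String)) (card_stats : List (Int × Int × Int)) : Prop := chain ≠ []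
instance (chain : List (Int × Int × Int × String)) (card_stats : List (Int × Int × Int)) : Decidable (Pre_chain_final_key chain card_stats) := by unfold Pre_chain_final_key; infer_instance
def pvWitness_chain_final_key : (List (Int × Int × Int × String)) × (List (Int × Int × Int)) :=
  ([(1, 2, 3, "equip")], [(3, 400, 200)])
def Spec_chain_final_key (chain : List (Int × Int × Int × String)) (card_stats : List (Int × Int × Int)) (out : Int × Int) : Prop := out = chain_final_key_alt chain card_stats
instance (chain : List (Int × Int × Int × String)) (card_stats : List (Int × Int × Int)) (out : Int × Int) : Decidable (Spec_chain_final_key chain card_stats out) := by unfold Spec_chain_final_key; infer_instance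

-- ===== CLAIM (what is proved, stated in full; the proofs are below) =====
def Claim_equal_chain_final_key : Prop := ∀ (chain : List (Int × Int × Int × String)) (card_stats : List (Int × Int × Int)), Dom_chain_final_key chain card_stats → Pre_chain_final_key chain card_stats → Spec_chain_final_key chain card_stats (chain_final_key chain card_stats)

-- ===== LEMMAS AND PROOFS =====

theorem dict_get?_erase (d : PySem.Dict Int Int) (a k : Int) :
    (d.erase a).get? k = if k = a then none else d.get? k := by
  obtain ⟨l⟩ := d
  simp only [PySem.Dict.erase, PySem.Dict.get?]
  induction l with
  | nil => simp
  | cons p rest ih =>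
    rw [List.filter_cons]
    by_cases hpa : p.1 = a
    · have hdrop : (!(p.1 == a)) = false := by simp [hpa]
      rw [hdrop, if_neg Bool.false_ne_true]
      by_cases hk : k = a
      · rw [ih]; simp [hk]
      · rw [ih, if_neg hk, if_neg hk, List.find?_cons_of_neg]
        simp [hpa, Ne.symm hk]
    · have hkeep : (!(p.1 == a)) = true := by simp [hpa]
      rw [hkeep, if_pos rfl]
      by_cases hpk : p.1 = k
      · have hk : k ≠ a := fun h => hpa (hpk.trans h)
        rw [List.find?_cons_of_pos (by simp [hpk]), if_neg hk,
          List.find?_cons_of_pos (by simp [hpk])]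
      · rw [List.find?_cons_of_neg (by simp [hpk]), ih,
          List.find?_cons_of_neg (by simp [hpk])]

theorem dict_getD_erase (d : PySem.Dict Int Int) (a k v : Int) :
    (d.erase a).getD k v = if k = a then v else d.getD k v := by
  simp only [PySem.Dict.getD_eq_get?_getD, dict_get?_erase]
  split <;> rfl

theorem foldl_stepA_snd : ∀ (l : List (Int × Int × Int × String)) (st : PySem.Dict Int Int × Option Int),
    l ≠ [] → (l.foldl stepA st).2 = l.getLast?.map (·.2.2.1) := by
  intro l
  induction l with
  | nil => intro st h; exact absurd rfl h
  | cons x rest ih =>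
    intro st _
    cases rest with
    | nil =>
      simp only [List.foldl, List.getLast?_singleton, Option.map_some, stepA]
      split <;> rfl
    | cons y ys =>
      rw [List.foldl_cons, ih (stepA st x) (by simp), List.getLast?_cons_cons]

theorem foldl_stepA_count (l : List (Int × Int × Int × String)) (L : Int) :
    ((l.foldl stepA (PySem.Dict.empty, none)).1).getD L 0 = altCount L l.reverse := by
  induction l using List.reverseRecOn with
  | nil => simp [altCount, PySem.Dict.getD_empty]
  | append_singleton xs x ih =>
    obtain ⟨a, b, r, t⟩ := x
    rw [List.foldl_append, List.foldl_cons, List.foldl_nil, List.reverse_append]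
    simp only [List.reverse_singleton, List.singleton_append]
    by_cases hf : t = "fusion"
    · simp only [stepA, hf, beq_self_eq_true, if_true, altCount]
      rw [dict_getD_erase, dict_getD_erase]
      by_cases hb : L = b
      · simp [hb]
      · by_cases ha : L = a
        · subst ha; simp [hb]
        · have h1 : (a == L) = false := by simp; exact fun h => ha h.symm
          have h2 : (b == L) = false := by simp; exact fun h => hb h.symm
          simp [hb, ha, h1, h2, ih]
    · have hf' : (t == "fusion") = false := by simp [hf]
      simp only [stepA, hf', Bool.false_eq_true, if_false, altCount, Bool.false_and,
        Bool.not_false, Bool.true_and]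
      rw [PySem.Dict.getD_insert]
      by_cases hr : L = r
      · subst hr
        rw [if_pos rfl, ih]
        simp
        omega
      · have h1 : (r == L) = false := by simp; exact fun h => hr h.symm
        rw [if_neg hr, ih, h1]
        simp

-- ===== VERDICT (by name: the statement is the Claim_ definition above) =====
theorem chain_final_key_spec : Claim_equal_chain_final_key := by
  intro chain card_stats _dom hpre
  unfold Spec_chain_final_key chain_final_key chain_final_key_alt
  obtain ⟨e, he⟩ : ∃ e, chain.getLast? = some e := by
    cases h : chain.getLast? with
    | none => exact absurd (List.getLast?_eq_none_iff.mp h) hpre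
    | some e => exact ⟨e, rfl⟩
  rw [foldl_stepA_snd chain _ hpre, he]
  simp only [Option.map_some, foldl_stepA_count]
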